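-- pv_equiv track=rewrite | github.com/alexsusanu/python | p4-2.py | smallLarge
-- ===== SOURCE A (Python) =====
-- def smallLarge(arg):
--     """
--     smallest and largest of the inputs
--
--     Args:
--         int arg
--     Variables:
--         int smallest, largest, i
--     Return:
--         small and large of input
--     """
--     arg = str(arg)
--     smallest = int(arg[0])
--     largest = int(arg[0])
--     for i in range(len(arg)):
--         if int(arg[i]) > largest:
--             largest = int(arg[i])
--         elif int(arg[i]) < smallest:
--             smallest = int(arg[i])
--     return smallest, largest
-- ===== SOURCE B (Python) =====
-- def smallLarge(arg):
--     digits = sorted(int(c) for c in str(arg))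
--     return digits[0], digits[-1]
-- ===== Notes on version B (the rewrite author's own statement) =====
-- stated objective: simpler
-- what changed: Replaces A's index loop that tracks running min/max with an if/elif chain by sorting the digit values once and taking the two endpoints of the sorted list.
import Mathlib
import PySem

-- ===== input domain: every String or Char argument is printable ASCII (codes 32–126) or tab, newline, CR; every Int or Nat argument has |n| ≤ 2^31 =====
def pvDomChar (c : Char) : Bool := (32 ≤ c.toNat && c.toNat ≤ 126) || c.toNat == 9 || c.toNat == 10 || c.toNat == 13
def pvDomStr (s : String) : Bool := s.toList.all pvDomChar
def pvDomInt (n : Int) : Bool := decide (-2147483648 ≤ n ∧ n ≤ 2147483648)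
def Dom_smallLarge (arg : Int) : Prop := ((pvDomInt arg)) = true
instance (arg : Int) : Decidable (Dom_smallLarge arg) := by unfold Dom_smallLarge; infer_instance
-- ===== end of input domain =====

-- B sorts the digit values once and returns the endpoints instead of A's min/max-tracking scan (objective: simpler).

-- int(c) for a one-character string c (default unreachable under Pre_)
def pvCharInt (c : Char) : Int := (PySem.Int.ofChars? [c]).getD 0

-- ===== PORT A =====
def smallLarge (arg : Int) : Int × Int :=
  let s := PySem.Int.toChars arg
  let smallest := pvCharInt (PySem.List.pyGetD s 0 ' ')
  let largest := pvCharInt (PySem.List.pyGetD s 0 ' ')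
  (PySem.List.pyRange 0 (s.length : Int) 1).foldl
    (fun (p : Int × Int) i =>
      let v := pvCharInt (PySem.List.pyGetD s i ' ')
      if v > p.2 then (p.1, v) else if v < p.1 then (v, p.2) else p)
    (smallest, largest)

-- ===== PORT B =====
def smallLarge_alt (arg : Int) : Int × Int :=
  let digits := PySem.List.sorted ((PySem.Int.toChars arg).map pvCharInt) (fun v => v) false
  (PySem.List.pyGetD digits 0 0, PySem.List.pyGetD digits (-1) 0)

-- ===== PRECONDITION & SPEC =====
-- Python's smallLarge raises ValueError on negative arg (int('-')); Pre_ admits exactly the nonnegative ints.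
def Pre_smallLarge (arg : Int) : Prop := 0 ≤ arg
instance (arg : Int) : Decidable (Pre_smallLarge arg) := by unfold Pre_smallLarge; infer_instance
def pvWitness_smallLarge : Int := 907

def Spec_smallLarge (arg : Int) (out : Int × Int) : Prop := out = smallLarge_alt arg
instance (arg : Int) (out : Int × Int) : Decidable (Spec_smallLarge arg out) := by unfold Spec_smallLarge; infer_instance

-- ===== CLAIM (what is proved, stated in full; the proofs are below) =====
def Claim_equal_smallLarge : Prop := ∀ (arg : Int), Dom_smallLarge arg → Pre_smallLarge arg → Spec_smallLarge arg (smallLarge arg)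

-- ===== LEMMAS AND PROOFS =====

-- A's loop body computes the running min/max, given the invariant S ≤ L.
theorem pv_foldl_minmax (l : List Int) (S L : Int) (h : S ≤ L) :
    l.foldl (fun (p : Int × Int) v =>
        if v > p.2 then (p.1, v) else if v < p.1 then (v, p.2) else p) (S, L)
      = (l.foldl min S, l.foldl max L) := by
  induction l generalizing S L with
  | nil => rfl
  | cons v t ih =>
    simp only [List.foldl_cons]
    split_ifs with h1 h2
    · rw [ih S v (by omega)]
      refine Prod.ext ?_ ?_ <;> simp only <;> congr 1 <;> omega
    · rw [ih v L (by omega)]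
      refine Prod.ext ?_ ?_ <;> simp only <;> congr 1 <;> omega
    · rw [ih S L h]
      refine Prod.ext ?_ ?_ <;> simp only <;> congr 1 <;> omega

theorem pv_toChars_ne_nil (arg : Int) : PySem.Int.toChars arg ≠ [] := by
  unfold PySem.Int.toChars
  split
  · simp
  · have h : 0 < (Nat.toDigits 10 arg.toNat).length := Nat.length_toDigits_pos
    intro hnil
    rw [hnil] at h
    simp at h

-- the two endpoints of the id-sorted list are the running min and max of the list
theorem pv_sorted_ends (a : Int) (t : List Int) :
    PySem.List.pyGetD (PySem.List.sorted (a :: t) (fun v => v) false) 0 0 = t.foldl min a ∧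
    PySem.List.pyGetD (PySem.List.sorted (a :: t) (fun v => v) false) (-1) 0 = t.foldl max a := by
  have hne : PySem.List.sorted (a :: t) (fun v => v) false ≠ [] := by
    simp [PySem.List.sorted_eq_nil_iff]
  obtain ⟨m, u, hmu⟩ := List.exists_cons_of_ne_nil hne
  have hmem : ∀ y, y ∈ PySem.List.sorted (a :: t) (fun v => v) false ↔ y ∈ a :: t :=
    PySem.List.mem_sorted (a :: t) (fun v => v) false
  constructor
  · -- head is the running min
    rw [hmu, PySem.List.pyGetD_zero_cons]
    have hlow : ∀ y ∈ a :: t, m ≤ y := PySem.List.key_head_sorted_le (a :: t) (fun v => v) hmu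
    have h1 : m ≤ t.foldl min a := by
      rcases PySem.List.foldl_min_mem t a with h | h
      · rw [h]; exact hlow a (by simp)
      · exact hlow _ (by simp [h])
    have h2 : t.foldl min a ≤ m := by
      have hm : m ∈ a :: t := (hmem m).mp (by rw [hmu]; simp)
      rcases List.mem_cons.mp hm with h | h
      · rw [h]; exact (PySem.List.foldl_min_le t a).1
      · exact (PySem.List.foldl_min_le t a).2 m h
    exact le_antisymm h1 h2
  · -- last is the running max
    rw [PySem.List.pyGetD_neg_one _ _ hne]
    have hlenpos : 0 < (PySem.List.sorted (a :: t) (fun v => v) false).length :=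
      List.length_pos_iff.mpr hne
    have hhigh : ∀ y ∈ a :: t,
        y ≤ (PySem.List.sorted (a :: t) (fun v => v) false).getLast hne := by
      intro y hy
      obtain ⟨p, hp, hpy⟩ := List.getElem_of_mem ((hmem y).mpr hy)
      have hmono := PySem.List.key_sorted_getElem_mono (a :: t) (fun v => v)
        (p := p) (q := (PySem.List.sorted (a :: t) (fun v => v) false).length - 1)
        (by omega) (by omega)
      rw [List.getLast_eq_getElem]
      simpa [hpy] using hmono
    have h1 : t.foldl max a ≤ (PySem.List.sorted (a :: t) (fun v => v) false).getLast hne := by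
      rcases PySem.List.foldl_max_mem t a with h | h
      · rw [h]; exact hhigh a (by simp)
      · exact hhigh _ (by simp [h])
    have h2 : (PySem.List.sorted (a :: t) (fun v => v) false).getLast hne ≤ t.foldl max a := by
      have hL : (PySem.List.sorted (a :: t) (fun v => v) false).getLast hne ∈ a :: t :=
        (hmem _).mp (List.getLast_mem hne)
      rcases List.mem_cons.mp hL with h | h
      · rw [h]; exact (PySem.List.le_foldl_max t a).1
      · exact (PySem.List.le_foldl_max t a).2 _ h
    exact le_antisymm h2 h1

-- ===== VERDICT (by name: the statement is the Claim_ definition above) =====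
theorem smallLarge_spec : Claim_equal_smallLarge := by
  intro arg _ _
  unfold Spec_smallLarge smallLarge smallLarge_alt
  simp only
  set cs := PySem.Int.toChars arg with hcs
  have hne : cs ≠ [] := pv_toChars_ne_nil arg
  obtain ⟨c, t, hct⟩ := List.exists_cons_of_ne_nil hne
  rw [PySem.List.foldl_pyRange_zero_pyGetD' cs ' '
    (fun (p : Int × Int) c =>
      if pvCharInt c > p.2 then (p.1, pvCharInt c)
      else if pvCharInt c < p.1 then (pvCharInt c, p.2) else p)]
  rw [← List.foldl_map (f := pvCharInt)
    (g := fun (p : Int × Int) v => if v > p.2 then (p.1, v) else if v < p.1 then (v, p.2) else p)]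
  rw [hct]
  rw [PySem.List.pyGetD_zero_cons]
  simp only [List.map_cons]
  rw [pv_foldl_minmax (pvCharInt c :: t.map pvCharInt) (pvCharInt c) (pvCharInt c) le_rfl]
  obtain ⟨h0, h1⟩ := pv_sorted_ends (pvCharInt c) (t.map pvCharInt)
  rw [h0, h1]
  simp
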